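-- pv_equiv track=rewrite | github.com/IGhost-P/Algorithm | Python/프로그래머스/완전탐색/모의고사.py | solution
-- ===== SOURCE A (Python) =====
-- def solution(answers):
--     answer = []
--     # 1번 수포자는 1->5번까지 반복
--     # 2번 수포자는 2 <-> 1,3,4,5 반복
--     # 3번 수포자는 3 -> 1 -> 2 -> 4 -> 5 방식으로 2번씩
--     # 간단하게 인덱스를 포인터로?
--     fir_math_dropper = [1, 2, 3, 4, 5]
--     fir = 0
--     sec_math_dropper = [2, 1, 2, 3, 2, 4, 2, 5]
--     sec = 0
--     thr_math_dropper = [3, 3, 1, 1, 2, 2, 4, 4, 5, 5]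
--     thr = 0
--     scored = list()
--     for idx, answer in enumerate(answers):
--         if (fir_math_dropper[idx % 5] == answer):
--             fir += 1
--         if (sec_math_dropper[idx % 8] == answer):
--             sec += 1
--         if (thr_math_dropper[idx % 10] == answer):
--             thr += 1
--     scores = [fir, sec, thr]
--     for idx, score in enumerate(scores):
--         if (score == max(scores)):
--             scored.append(idx+1)
--     return scored
-- ===== SOURCE B (Python) =====
-- def _score(answers, pattern):
--     count = 0
--     cur = pattern
--     for a in answers:
--         if a == cur[0]:
--             count += 1
--         cur = cur[1:] or pattern
--     return count
--
--
-- def solution(answers):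
--     patterns = [[1, 2, 3, 4, 5],
--                 [2, 1, 2, 3, 2, 4, 2, 5],
--                 [3, 3, 1, 1, 2, 2, 4, 4, 5, 5]]
--     scores = [_score(answers, p) for p in patterns]
--     best = max(scores)
--     return [i + 1 for i, s in enumerate(scores) if s == best]
-- ===== Notes on version B (the rewrite author's own statement) =====
-- stated objective: idiomatic
-- what changed: A's single fused loop updating three counters via pattern[idx % len] index arithmetic is replaced by an independent per-pattern scoring pass driven by a rotating cyclic pattern list (cur = cur[1:] or pattern), then max and a comprehension pick the winners.
import Mathlib
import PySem

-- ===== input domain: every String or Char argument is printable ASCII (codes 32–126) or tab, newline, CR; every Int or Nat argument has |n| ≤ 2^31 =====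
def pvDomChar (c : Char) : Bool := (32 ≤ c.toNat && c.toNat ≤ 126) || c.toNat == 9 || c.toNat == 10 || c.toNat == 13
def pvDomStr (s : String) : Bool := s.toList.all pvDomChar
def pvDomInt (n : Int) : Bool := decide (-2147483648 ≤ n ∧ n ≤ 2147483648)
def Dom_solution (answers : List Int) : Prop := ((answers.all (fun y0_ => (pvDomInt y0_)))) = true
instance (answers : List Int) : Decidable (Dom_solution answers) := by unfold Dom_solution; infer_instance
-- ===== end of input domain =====

-- B replaces A's fused three-counter loop with modular index arithmetic by an
-- independent per-pattern pass driven by a rotating (cyclic) pattern list; same values,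
-- idiomatic decomposition, no speed claim.

-- ===== PORT A =====
-- A: one loop over enumerate(answers) updating three counters via pattern[idx % len].
def solution (answers : List Int) : List Int :=
  let fir_md : List Int := [1, 2, 3, 4, 5]
  let sec_md : List Int := [2, 1, 2, 3, 2, 4, 2, 5]
  let thr_md : List Int := [3, 3, 1, 1, 2, 2, 4, 4, 5, 5]
  let st := (PySem.List.enumerate answers).foldl
    (fun (s : Int × Int × Int) (p : Int × Int) =>
      ( s.1 + (if PySem.List.pyGetD fir_md (PySem.Int.mod p.1 5) 0 = p.2 then 1 else 0),
        s.2.1 + (if PySem.List.pyGetD sec_md (PySem.Int.mod p.1 8) 0 = p.2 then 1 else 0),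
        s.2.2 + (if PySem.List.pyGetD thr_md (PySem.Int.mod p.1 10) 0 = p.2 then 1 else 0)))
    (0, 0, 0)
  let scores : List Int := [st.1, st.2.1, st.2.2]
  (PySem.List.enumerate scores).foldl
    (fun acc p => if p.2 = (PySem.List.max? scores (fun y => y)).getD 0 then acc ++ [p.1 + 1] else acc) []

-- ===== PORT B =====
-- B helper _score: rotating current-pattern list, `cur = cur[1:] or pattern`.
def pvScoreStep (pattern : List Int) (s : Int × List Int) (a : Int) : Int × List Int :=
  ((if PySem.List.pyGet? s.2 0 = some a then s.1 + 1 else s.1),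
   if s.2.tail = [] then pattern else s.2.tail)

def pvScore (answers pattern : List Int) : Int :=
  (answers.foldl (pvScoreStep pattern) (0, pattern)).1

def solution_alt (answers : List Int) : List Int :=
  let patterns : List (List Int) :=
    [[1, 2, 3, 4, 5], [2, 1, 2, 3, 2, 4, 2, 5], [3, 3, 1, 1, 2, 2, 4, 4, 5, 5]]
  let scores := patterns.map (fun p => pvScore answers p)
  let best := (PySem.List.max? scores (fun y => y)).getD 0
  (PySem.List.enumerate scores).filterMap
    (fun p => if p.2 = best then some (p.1 + 1) else none)

-- ===== PRECONDITION & SPEC =====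
def Spec_solution (answers : List Int) (out : List Int) : Prop := out = solution_alt answers
instance (answers : List Int) (out : List Int) : Decidable (Spec_solution answers out) := by unfold Spec_solution; infer_instance

-- ===== CLAIM (what is proved, stated in full; the proofs are below) =====
def Claim_equal_solution : Prop := ∀ (answers : List Int), Dom_solution answers → Spec_solution answers (solution answers)

-- ===== LEMMAS AND PROOFS =====

/-- Common count: matches of `answers` against `pat` cycled from position `j`. -/
def pvCnt (pat : List Int) : Nat → List Int → Int
  | _, [] => 0
  | j, a :: as => (if pat.getD (j % pat.length) 0 = a then 1 else 0) + pvCnt pat (j + 1) as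

lemma pvScore_fold (pat : List Int) (hp : pat ≠ []) :
    ∀ (as : List Int) (j : Nat) (c : Int),
      (as.foldl (pvScoreStep pat) (c, pat.drop (j % pat.length))).1 = c + pvCnt pat j as := by
  intro as
  induction as with
  | nil => intro j c; simp [pvCnt]
  | cons a as ih =>
    intro j c
    have hn : 0 < pat.length := List.length_pos_iff.mpr hp
    have hj : j % pat.length < pat.length := Nat.mod_lt _ hn
    have hhead : PySem.List.pyGet? (pat.drop (j % pat.length)) 0 = pat[j % pat.length]? := by
      simp [PySem.List.pyGet?, PySem.List.pyIdx?, List.getElem?_drop, hj]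
    have hmodsucc : (j + 1) % pat.length = (j % pat.length + 1) % pat.length :=
      (Nat.mod_add_mod j pat.length 1).symm
    have hcur : (if (pat.drop (j % pat.length)).tail = [] then pat else (pat.drop (j % pat.length)).tail)
        = pat.drop ((j + 1) % pat.length) := by
      rw [List.tail_drop]
      by_cases he : pat.length ≤ j % pat.length + 1
      · have h1 : j % pat.length + 1 = pat.length := by omega
        have h2 : (j + 1) % pat.length = 0 := by rw [hmodsucc, h1, Nat.mod_self]
        simp [h1, h2]
      · have h2 : (j + 1) % pat.length = j % pat.length + 1 := by
          rw [hmodsucc]; exact Nat.mod_eq_of_lt (by omega)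
        rw [if_neg, h2]
        simp [List.drop_eq_nil_iff]; omega
    have hget : pat[j % pat.length]? = some (pat.getD (j % pat.length) 0) := by
      rw [List.getD_eq_getElem _ _ hj]; exact List.getElem?_eq_getElem hj
    have hstep : pvScoreStep pat (c, pat.drop (j % pat.length)) a
        = ((if pat.getD (j % pat.length) 0 = a then 1 else 0) + c, pat.drop ((j + 1) % pat.length)) := by
      simp only [pvScoreStep, hhead, hcur, hget, Option.some.injEq]
      split_ifs <;> simp <;> ring
    simp only [List.foldl_cons]
    rw [hstep, ih (j + 1)]
    simp [pvCnt]; ring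

lemma pvA_fold (as : List Int) : ∀ (j : Nat) (f s t : Int),
    (PySem.List.enumerate as (j : Int)).foldl
      (fun (s : Int × Int × Int) (p : Int × Int) =>
        ( s.1 + (if PySem.List.pyGetD [1, 2, 3, 4, 5] (PySem.Int.mod p.1 5) 0 = p.2 then 1 else 0),
          s.2.1 + (if PySem.List.pyGetD [2, 1, 2, 3, 2, 4, 2, 5] (PySem.Int.mod p.1 8) 0 = p.2 then 1 else 0),
          s.2.2 + (if PySem.List.pyGetD [3, 3, 1, 1, 2, 2, 4, 4, 5, 5] (PySem.Int.mod p.1 10) 0 = p.2 then 1 else 0)))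
      (f, s, t)
    = (f + pvCnt [1, 2, 3, 4, 5] j as,
       s + pvCnt [2, 1, 2, 3, 2, 4, 2, 5] j as,
       t + pvCnt [3, 3, 1, 1, 2, 2, 4, 4, 5, 5] j as) := by
  induction as with
  | nil => intro j f s t; simp [PySem.List.enumerate, pvCnt]
  | cons a as ih =>
    intro j f s t
    rw [PySem.List.enumerate_cons]
    have hcast : (j : Int) + 1 = ((j + 1 : Nat) : Int) := by push_cast; ring
    simp only [List.foldl_cons, hcast, ih (j + 1)]
    have hm5 : PySem.Int.mod (j : Int) 5 = ((j % 5 : Nat) : Int) := by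
      rw [PySem.Int.mod_eq_emod_of_pos (by omega)]; omega
    have hm8 : PySem.Int.mod (j : Int) 8 = ((j % 8 : Nat) : Int) := by
      rw [PySem.Int.mod_eq_emod_of_pos (by omega)]; omega
    have hm10 : PySem.Int.mod (j : Int) 10 = ((j % 10 : Nat) : Int) := by
      rw [PySem.Int.mod_eq_emod_of_pos (by omega)]; omega
    simp only [hm5, hm8, hm10, PySem.List.pyGetD_natCast]
    simp [pvCnt]
    refine ⟨?_, ?_, ?_⟩ <;> ring

lemma pvScore_eq (pat : List Int) (hp : pat ≠ []) (as : List Int) :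
    pvScore as pat = pvCnt pat 0 as := by
  have := pvScore_fold pat hp as 0 0
  simpa [pvScore, Nat.zero_mod] using this

-- ===== VERDICT (by name: the statement is the Claim_ definition above) =====
theorem solution_spec : Claim_equal_solution := by
  intro answers _
  unfold Spec_solution solution solution_alt
  have hA := pvA_fold answers 0 0 0 0
  simp only [Nat.cast_zero] at hA
  have h1 := pvScore_eq [1, 2, 3, 4, 5] (by simp) answers
  have h2 := pvScore_eq [2, 1, 2, 3, 2, 4, 2, 5] (by simp) answers
  have h3 := pvScore_eq [3, 3, 1, 1, 2, 2, 4, 4, 5, 5] (by simp) answers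
  simp only [List.map_cons, List.map_nil, h1, h2, h3, hA, zero_add]
  simp only [PySem.List.enumerate_cons, PySem.List.enumerate_nil, List.foldl_cons, List.foldl_nil,
    List.filterMap_cons, List.filterMap_nil]
  split_ifs <;> simp
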